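-- pv_equiv track=rewrite | github.com/GiantHui/5-chrY-capture-analysis | 2-ISOGG/script/2-7.4M位点-ISOGG.py | is_position_in_ranges
-- ===== SOURCE A (Python) =====
-- from typing import List, Tuple
--
-- def is_position_in_ranges(position: int, ranges: List[Tuple[int, int]]) -> bool:
--     """
--     检查位点是否在任何一个范围内
--     使用二分查找优化性能
--
--     Args:
--         position: 要检查的位点位置
--         ranges: 已排序的位点范围列表
--
--     Returns:
--         bool: 如果位点在范围内返回True，否则返回False
--     """
--     left, right = 0, len(ranges) - 1
--
--     while left <= right:
--         mid = (left + right) // 2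
--         start, end = ranges[mid]
--
--         if start <= position <= end:
--             return True
--         elif position < start:
--             right = mid - 1
--         else:
--             left = mid + 1
--
--     return False
-- ===== SOURCE B (Python) =====
-- def is_position_in_ranges(position, ranges):
--     """Divide-and-conquer on list slices: probe the (left-biased) middle range,
--     then recurse into the left or right sub-slice."""
--     def go(sub):
--         if not sub:
--             return False
--         mid = (len(sub) - 1) // 2
--         start, end = sub[mid]
--         if start <= position <= end:
--             return True
--         if position < start:
--             return go(sub[:mid])
--         return go(sub[mid + 1:])
--     return go(ranges)
-- ===== Notes on version B (the rewrite author's own statement) =====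
-- stated objective: alternative
-- what changed: Index-pair iterative binary search replaced by a divide-and-conquer recursion on list slices (probe the left-biased middle, recurse into the sub-slice), with no index bookkeeping against the original list.
import Mathlib
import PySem

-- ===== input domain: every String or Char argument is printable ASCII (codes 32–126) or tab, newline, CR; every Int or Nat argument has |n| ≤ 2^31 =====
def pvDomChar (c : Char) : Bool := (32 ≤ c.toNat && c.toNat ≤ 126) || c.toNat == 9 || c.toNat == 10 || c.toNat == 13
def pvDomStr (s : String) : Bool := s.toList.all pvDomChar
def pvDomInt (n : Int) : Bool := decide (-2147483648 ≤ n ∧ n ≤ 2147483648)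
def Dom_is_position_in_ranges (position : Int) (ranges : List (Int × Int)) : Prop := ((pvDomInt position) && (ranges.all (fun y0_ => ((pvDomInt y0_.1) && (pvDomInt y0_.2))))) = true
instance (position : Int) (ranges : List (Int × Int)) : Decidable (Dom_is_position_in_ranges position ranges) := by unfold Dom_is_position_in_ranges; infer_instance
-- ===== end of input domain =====

-- B replaces A's index-pair iterative binary search by a divide-and-conquer recursion on
-- list slices (alternative decomposition, same probe sequence, hence equal on all inputs).

-- ===== PORT A =====
-- while-loop over (left, right) index pair; ranges[mid] is always in range here, so the
-- total pyGetD form is exact (Python never raises in A).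
def pvGoA (position : Int) (ranges : List (Int × Int)) (left right : Int) : Bool :=
  if h : left ≤ right then
    let mid := PySem.Int.floordiv (left + right) 2
    let p := PySem.List.pyGetD ranges mid (0, 0)
    if p.1 ≤ position ∧ position ≤ p.2 then true
    else if position < p.1 then pvGoA position ranges left (mid - 1)
    else pvGoA position ranges (mid + 1) right
  else false
termination_by (right + 1 - left).toNat
decreasing_by
  · have := PySem.Int.floordiv_two_mid_bounds h; omega
  · have := PySem.Int.floordiv_two_mid_bounds h; omega

def is_position_in_ranges (position : Int) (ranges : List (Int × Int)) : Bool :=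
  pvGoA position ranges 0 ((ranges.length : Int) - 1)

-- ===== PORT B =====
def pvGoB (position : Int) (sub : List (Int × Int)) : Bool :=
  if hs : sub = [] then false
  else
    let mid := PySem.Int.floordiv ((sub.length : Int) - 1) 2
    let p := PySem.List.pyGetD sub mid (0, 0)
    if p.1 ≤ position ∧ position ≤ p.2 then true
    else if position < p.1 then pvGoB position (PySem.List.slice sub none (some mid))
    else pvGoB position (PySem.List.slice sub (some (mid + 1)) none)
termination_by sub.length
decreasing_by
  · have h0 : 0 < sub.length := List.length_pos_of_ne_nil hs
    have hm : PySem.Int.floordiv ((sub.length : Int) - 1) 2 = ((sub.length : Int) - 1) / 2 :=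
      PySem.Int.floordiv_eq_ediv_of_pos (by omega)
    rw [hm, PySem.List.slice_to sub (by omega)]
    simp only [List.length_take]
    omega
  · have h0 : 0 < sub.length := List.length_pos_of_ne_nil hs
    have hm : PySem.Int.floordiv ((sub.length : Int) - 1) 2 = ((sub.length : Int) - 1) / 2 :=
      PySem.Int.floordiv_eq_ediv_of_pos (by omega)
    rw [hm, PySem.List.slice_from sub (by omega)]
    simp only [List.length_drop]
    omega

def is_position_in_ranges_alt (position : Int) (ranges : List (Int × Int)) : Bool :=
  pvGoB position ranges

-- ===== PRECONDITION & SPEC =====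
def Spec_is_position_in_ranges (position : Int) (ranges : List (Int × Int)) (out : Bool) : Prop := out = is_position_in_ranges_alt position ranges
instance (position : Int) (ranges : List (Int × Int)) (out : Bool) : Decidable (Spec_is_position_in_ranges position ranges out) := by unfold Spec_is_position_in_ranges; infer_instance

-- ===== CLAIM (what is proved, stated in full; the proofs are below) =====
def Claim_equal_is_position_in_ranges : Prop := ∀ (position : Int) (ranges : List (Int × Int)), Dom_is_position_in_ranges position ranges → Spec_is_position_in_ranges position ranges (is_position_in_ranges position ranges)

-- ===== LEMMAS AND PROOFS =====

-- A's search over [left, right] equals B's recursion on the corresponding sub-slice.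
theorem pvGoA_eq_goB (position : Int) (ranges : List (Int × Int)) :
    ∀ (n : Nat) (left right : Int), (right + 1 - left).toNat = n →
      0 ≤ left → right < (ranges.length : Int) →
      pvGoA position ranges left right =
        pvGoB position ((ranges.drop left.toNat).take (right + 1 - left).toNat) := by
  intro n
  induction n using Nat.strong_induction_on with
  | _ n ih =>
    intro left right hn hl hr
    rw [pvGoA, pvGoB]
    by_cases h : left ≤ right
    · have hlen0 : left.toNat ≤ ranges.length := by omega
      have hsublen : ((ranges.drop left.toNat).take (right + 1 - left).toNat).length
          = (right + 1 - left).toNat := by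
        simp only [List.length_take, List.length_drop]; omega
      have hne : (ranges.drop left.toNat).take (right + 1 - left).toNat ≠ [] := by
        intro he; rw [he] at hsublen; simp at hsublen; omega
      rw [dif_pos h, dif_neg hne]
      -- rewrite both floordivs into ediv, and B's midpoint into A's shifted midpoint
      have hdA : PySem.Int.floordiv (left + right) 2 = (left + right) / 2 :=
        PySem.Int.floordiv_eq_ediv_of_pos (by omega)
      have hdB : PySem.Int.floordiv (((right + 1 - left).toNat : Int) - 1) 2
          = (((right + 1 - left).toNat : Int) - 1) / 2 :=
        PySem.Int.floordiv_eq_ediv_of_pos (by omega)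
      have hmid_rel : (((right + 1 - left).toNat : Int) - 1) / 2 = (left + right) / 2 - left := by
        omega
      simp only [hsublen, hdA, hdB, hmid_rel]
      set midA := (left + right) / 2 with hmidA_def
      have hmidA : left ≤ midA ∧ midA ≤ right := by omega
      -- the probed elements agree
      have hAin : 0 ≤ midA ∧ midA < (ranges.length : Int) := by omega
      have hBidx : 0 ≤ midA - left ∧ midA - left < ((right + 1 - left).toNat : Int) := by omega
      have hget : PySem.List.pyGetD ((ranges.drop left.toNat).take (right + 1 - left).toNat) (midA - left) (0, 0)
          = PySem.List.pyGetD ranges midA (0, 0) := by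
        rw [PySem.List.pyGetD_eq_getElem _ (0, 0) (by omega) (by rw [hsublen]; omega),
            PySem.List.pyGetD_eq_getElem ranges (0, 0) hAin.1 hAin.2]
        rw [List.getElem_take, List.getElem_drop]
        congr 1
        omega
      rw [hget]
      by_cases hhit : (PySem.List.pyGetD ranges midA (0, 0)).1 ≤ position ∧
          position ≤ (PySem.List.pyGetD ranges midA (0, 0)).2
      · rw [if_pos hhit, if_pos hhit]
      · rw [if_neg hhit, if_neg hhit]
        by_cases hlt : position < (PySem.List.pyGetD ranges midA (0, 0)).1
        · rw [if_pos hlt, if_pos hlt]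
          -- left half: sub[:mid] = window [left, midA - 1]
          have hslice : PySem.List.slice ((ranges.drop left.toNat).take (right + 1 - left).toNat)
              none (some (midA - left))
              = (ranges.drop left.toNat).take ((midA - 1) + 1 - left).toNat := by
            rw [PySem.List.slice_to _ (by omega)]
            rw [List.take_take]
            congr 1
            omega
          rw [hslice]
          exact ih ((midA - 1) + 1 - left).toNat (by omega) left (midA - 1) rfl hl (by omega)
        · rw [if_neg hlt, if_neg hlt]
          -- right half: sub[mid+1:] = window [midA + 1, right]
          have hslice : PySem.List.slice ((ranges.drop left.toNat).take (right + 1 - left).toNat)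
              (some (midA - left + 1)) none
              = (ranges.drop (midA + 1).toNat).take (right + 1 - (midA + 1)).toNat := by
            rw [PySem.List.slice_from _ (by omega)]
            rw [List.drop_take, List.drop_drop]
            congr 1
            · omega
            · congr 1
              omega
          rw [hslice]
          exact ih (right + 1 - (midA + 1)).toNat (by omega) (midA + 1) right rfl (by omega) hr
    · have : (right + 1 - left).toNat = 0 := by omega
      rw [dif_neg h, this, List.take_zero]
      simp

-- ===== VERDICT (by name: the statement is the Claim_ definition above) =====
theorem is_position_in_ranges_spec : Claim_equal_is_position_in_ranges := by
  intro position ranges _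
  unfold Spec_is_position_in_ranges is_position_in_ranges is_position_in_ranges_alt
  rw [pvGoA_eq_goB position ranges _ 0 ((ranges.length : Int) - 1) rfl le_rfl (by omega)]
  congr 1
  simp
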